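-- pv_equiv track=rewrite | github.com/Largo47/BasicLogSystem | BasicLogSystem/LogHandlerApp/models.py | filterLog
-- ===== SOURCE A (Python) =====
-- def filterLog(log, tags=['rror:', 'arning:'], stack_tags=['failed.', 'allstack']):
--     # Take log a list of lines and find the ones with relevant substrings.
--     # If specific substring indicating start of a call stack found, put the rest of the file in
--     ret = {}
--     line_counter = 0
--     stack_reached = False
--     for line in log:
--         line_counter += 1
--         if stack_reached is True:
--             ret[line_counter] = line
--             continue
--         for tag in tags:
--             if tag in line:
--                 ret[line_counter] = line
--                 break
--         for tag in stack_tags: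
--             if tag in line:
--                 ret[line_counter] = line
--                 stack_reached = True
--                 break
--     return ret
-- ===== SOURCE B (Python) =====
-- def filterLog(log, tags=['rror:', 'arning:'], stack_tags=['failed.', 'allstack']):
--     # Two passes: find the first stack-tag line (boundary), then filter by tags / tail.
--     lines = list(log)
--     boundary = next((i for i, line in enumerate(lines)
--                      if any(t in line for t in stack_tags)), len(lines))
--     return {i + 1: line for i, line in enumerate(lines)
--             if i >= boundary or any(t in line for t in tags)}
-- ===== Notes on version B (the rewrite author's own statement) =====
-- stated objective: alternative
-- what changed: Replaces A's single stateful loop (a stack_reached flag flipped mid-loop, dict inserts in three places) by two stateless passes: first locate the boundary = index of the first line containing a stack tag, then build the result with one dict comprehension keeping line i+1 iff i >= boundary or a tag matches.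
import Mathlib
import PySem

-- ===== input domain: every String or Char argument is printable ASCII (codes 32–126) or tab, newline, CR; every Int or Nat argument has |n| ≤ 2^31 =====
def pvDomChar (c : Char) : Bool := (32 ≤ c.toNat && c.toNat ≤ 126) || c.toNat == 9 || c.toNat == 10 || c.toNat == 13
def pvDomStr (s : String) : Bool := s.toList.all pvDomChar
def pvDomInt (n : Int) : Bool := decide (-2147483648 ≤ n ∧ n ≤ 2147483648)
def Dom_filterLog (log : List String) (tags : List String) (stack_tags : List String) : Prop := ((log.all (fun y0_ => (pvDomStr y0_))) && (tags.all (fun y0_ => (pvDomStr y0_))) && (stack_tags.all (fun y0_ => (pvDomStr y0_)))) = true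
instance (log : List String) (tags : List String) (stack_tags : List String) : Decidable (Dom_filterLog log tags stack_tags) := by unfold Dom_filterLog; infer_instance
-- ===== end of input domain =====

-- B replaces A's single stateful loop (flag flipped mid-loop) by a boundary scan plus a
-- stateless filter pass; objective: alternative decomposition (no speed claim).

-- ===== PORT A =====
-- one foldl step per line: state = (ret dict, line_counter, stack_reached);
-- the two inner for/break loops are the `any` tests, inserting exactly where A does.
def filterLogStep (tags : List String) (stack_tags : List String)
    (st : PySem.Dict Int String × Int × Bool) (line : String) :
    PySem.Dict Int String × Int × Bool :=
  let lc := st.2.1 + 1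
  if st.2.2 = true then (st.1.insert lc line, lc, st.2.2)
  else
    let d1 := if tags.any (fun tag => PySem.Str.isIn tag line) then st.1.insert lc line else st.1
    if stack_tags.any (fun tag => PySem.Str.isIn tag line) then (d1.insert lc line, lc, true)
    else (d1, lc, st.2.2)

def filterLog (log : List String) (tags : List String) (stack_tags : List String) : List (Int × String) :=
  (log.foldl (filterLogStep tags stack_tags) (PySem.Dict.empty, 0, false)).1.items

-- ===== PORT B =====
-- boundary = index of first line containing a stack tag (length if none), then one filter pass
def filterLog_alt (log : List String) (tags : List String) (stack_tags : List String) : List (Int × String) :=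
  let boundary : Int := (log.findIdx (fun line => stack_tags.any (fun t => PySem.Str.isIn t line)) : Int)
  ((PySem.List.enumerate log 0).filter
      (fun p => boundary ≤ p.1 || tags.any (fun t => PySem.Str.isIn t p.2))).map
    (fun p => (p.1 + 1, p.2))

-- ===== PRECONDITION & SPEC =====
def Spec_filterLog (log : List String) (tags : List String) (stack_tags : List String) (out : List (Int × String)) : Prop := out = filterLog_alt log tags stack_tags
instance (log : List String) (tags : List String) (stack_tags : List String) (out : List (Int × String)) : Decidable (Spec_filterLog log tags stack_tags out) := by unfold Spec_filterLog; infer_instance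

-- ===== CLAIM (what is proved, stated in full; the proofs are below) =====
def Claim_equal_filterLog : Prop := ∀ (log : List String) (tags : List String) (stack_tags : List String), Dom_filterLog log tags stack_tags → Spec_filterLog log tags stack_tags (filterLog log tags stack_tags)

-- ===== LEMMAS AND PROOFS =====

-- shifting the start of enumerate shifts every index
theorem enumerate_shift (xs : List String) (s : Int) :
    PySem.List.enumerate xs (s + 1) =
      (PySem.List.enumerate xs s).map (fun p => (p.1 + 1, p.2)) := by
  induction xs generalizing s with
  | nil => simp [PySem.List.enumerate_nil]
  | cons x xs ih =>
    simp only [PySem.List.enumerate_cons, List.map_cons]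
    exact congrArg _ (by rw [show s + 1 + 1 = (s + 1) + 1 from rfl, ih])

-- once the flag is set, the rest of the loop appends every remaining line
theorem foldl_flag_true (tags stack_tags : List String) (lines : List String)
    (d : PySem.Dict Int String) (n : Int) (hinv : ∀ k ∈ d.keys, k ≤ n) :
    (lines.foldl (filterLogStep tags stack_tags) (d, n, true)).1.items =
      d.items ++ PySem.List.enumerate lines (n + 1) := by
  induction lines generalizing d n with
  | nil => simp [PySem.List.enumerate_nil]
  | cons line rest ih =>
    have hfresh : d.contains (n + 1) = false := by
      rw [← Bool.not_eq_true, PySem.Dict.contains_iff_mem_keys]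
      intro hk; have := hinv _ hk; omega
    have hinv' : ∀ k ∈ (d.insert (n + 1) line).keys, k ≤ n + 1 := by
      intro k hk
      rcases (PySem.Dict.mem_keys_insert _ _ _ _).1 hk with h | h
      · omega
      · have := hinv _ h; omega
    simp only [List.foldl_cons, filterLogStep]
    rw [if_pos trivial]
    rw [ih _ _ hinv', PySem.Dict.items_insert_of_not_contains _ _ hfresh,
        PySem.List.enumerate_cons]
    simp

-- main invariant: from a flag-off state with all keys ≤ n, the loop appends exactly
-- the filtered enumeration starting at n+1, with boundary findIdx + n + 1
theorem foldl_flag_false (tags stack_tags : List String) (lines : List String)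
    (d : PySem.Dict Int String) (n : Int) (hinv : ∀ k ∈ d.keys, k ≤ n) :
    (lines.foldl (filterLogStep tags stack_tags) (d, n, false)).1.items =
      d.items ++
        (PySem.List.enumerate lines (n + 1)).filter
          (fun p => (decide ((lines.findIdx (fun l => stack_tags.any (fun t => PySem.Str.isIn t l)) : Int) + n + 1 ≤ p.1)
                      || tags.any (fun t => PySem.Str.isIn t p.2))) := by
  induction lines generalizing d n with
  | nil => simp [PySem.List.enumerate_nil]
  | cons line rest ih =>
    have hfresh : d.contains (n + 1) = false := by
      rw [← Bool.not_eq_true, PySem.Dict.contains_iff_mem_keys]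
      intro hk; have := hinv _ hk; omega
    simp only [List.foldl_cons, filterLogStep, List.findIdx_cons]
    rw [if_neg (by simp)]
    by_cases hst : (stack_tags.any fun t => PySem.Str.isIn t line) = true
    · -- stack tag on this line: boundary is here, everything from here on is kept
      simp only [hst, cond_true, Nat.cast_zero]
      have hkeep : ∀ p ∈ PySem.List.enumerate (line :: rest) (n + 1),
          (decide ((0 : Int) + n + 1 ≤ p.1) || tags.any (fun t => PySem.Str.isIn t p.2)) = true := by
        intro p hp
        rcases (PySem.List.mem_enumerate_iff _ _ _).1 hp with ⟨k, hk, rfl⟩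
        have h1 : (0 : Int) + n + 1 ≤ n + 1 + (k : Int) := by omega
        simp only [Bool.or_eq_true, decide_eq_true_eq]
        left; exact h1
      rw [List.filter_eq_self.2 hkeep]
      set d1 := if (tags.any fun tag => PySem.Str.isIn tag line) = true then d.insert (n + 1) line else d with hd1
      have hinv2 : ∀ k ∈ (d1.insert (n + 1) line).keys, k ≤ n + 1 := by
        intro k hk
        rcases (PySem.Dict.mem_keys_insert _ _ _ _).1 hk with h | h
        · omega
        · rw [hd1] at h
          by_cases ht : (tags.any fun tag => PySem.Str.isIn tag line) = true
          · rw [if_pos ht] at h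
            rcases (PySem.Dict.mem_keys_insert _ _ _ _).1 h with h' | h'
            · omega
            · have := hinv _ h'; omega
          · rw [if_neg ht] at h; have := hinv _ h; omega
      rw [if_pos trivial]
      rw [foldl_flag_true tags stack_tags rest _ _ hinv2]
      have hitems : (d1.insert (n + 1) line).items = d.items ++ [((n : Int) + 1, line)] := by
        by_cases ht : (tags.any fun tag => PySem.Str.isIn tag line) = true
        · rw [hd1, if_pos ht, PySem.Dict.insert_insert_self]
          exact PySem.Dict.items_insert_of_not_contains _ _ hfresh
        · rw [hd1, if_neg ht]
          exact PySem.Dict.items_insert_of_not_contains _ _ hfresh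
      rw [hitems, PySem.List.enumerate_cons]
      simp
    · -- no stack tag: recurse with the possibly-extended dict
      simp only [Bool.not_eq_true] at hst
      simp only [hst, cond_false]
      rw [if_neg (by simp)]
      set d1 := if (tags.any fun tag => PySem.Str.isIn tag line) = true then d.insert (n + 1) line else d with hd1
      have hinv1 : ∀ k ∈ d1.keys, k ≤ n + 1 := by
        intro k hk
        rw [hd1] at hk
        by_cases ht : (tags.any fun tag => PySem.Str.isIn tag line) = true
        · rw [if_pos ht] at hk
          rcases (PySem.Dict.mem_keys_insert _ _ _ _).1 hk with h | h
          · omega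
          · have := hinv _ h; omega
        · rw [if_neg ht] at hk; have := hinv _ hk; omega
      rw [ih d1 (n + 1) hinv1, PySem.List.enumerate_cons, List.filter_cons]
      have hhead : (decide (((rest.findIdx (fun l => stack_tags.any (fun t => PySem.Str.isIn t l)) + 1 : Nat) : Int) + n + 1 ≤ n + 1)
            || tags.any (fun t => PySem.Str.isIn t line)) = tags.any (fun t => PySem.Str.isIn t line) := by
        have h1 : ¬ (((rest.findIdx (fun l => stack_tags.any (fun t => PySem.Str.isIn t l)) + 1 : Nat) : Int) + n + 1 ≤ n + 1) := by
          push_cast; omega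
        rw [decide_eq_false h1, Bool.false_or]
      rw [hhead]
      have hcond : ∀ p ∈ PySem.List.enumerate rest (n + 1 + 1),
          (decide ((rest.findIdx (fun l => stack_tags.any (fun t => PySem.Str.isIn t l)) : Int) + (n + 1) + 1 ≤ p.1)
              || tags.any (fun t => PySem.Str.isIn t p.2))
          = (decide (((rest.findIdx (fun l => stack_tags.any (fun t => PySem.Str.isIn t l)) + 1 : Nat) : Int) + n + 1 ≤ p.1)
              || tags.any (fun t => PySem.Str.isIn t p.2)) := by
        intro p _
        congr 1
        simp only [decide_eq_decide]; push_cast; omega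
      rw [List.filter_congr hcond]
      by_cases ht : (tags.any fun tag => PySem.Str.isIn tag line) = true
      · have hd1items : d1.items = d.items ++ [((n : Int) + 1, line)] := by
          rw [hd1, if_pos ht]
          exact PySem.Dict.items_insert_of_not_contains _ _ hfresh
        rw [if_pos ht, hd1items, List.append_assoc]
        rfl
      · have hd1items : d1.items = d.items := by rw [hd1, if_neg ht]
        rw [if_neg ht, hd1items]

-- ===== VERDICT (by name: the statement is the Claim_ definition above) =====
theorem filterLog_spec : Claim_equal_filterLog := by
  intro log tags stack_tags _
  unfold Spec_filterLog filterLog filterLog_alt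
  rw [foldl_flag_false tags stack_tags log PySem.Dict.empty 0
        (by intro k hk; simp [PySem.Dict.keys_empty] at hk)]
  rw [show (0 : Int) + 1 = 0 + 1 from rfl, enumerate_shift log 0, List.filter_map]
  have hempty : (PySem.Dict.empty : PySem.Dict Int String).items = [] := rfl
  rw [hempty]
  simp only [List.nil_append]
  congr 1
  apply List.filter_congr
  intro p _
  simp only [Function.comp_apply]
  congr 1
  simp only [decide_eq_decide]
  omega
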